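-- pv_equiv track=rewrite | github.com/ttony0321/algorithm | other/time_complexity.py | func
-- ===== SOURCE A (Python) =====
-- def func(n):
--     sum = 0 #대입 연산 1회
--     i =  0 #대입 연산 1회
--
--     for i in range(n):#반복문 n + 1
--         sum += 1 #덧셈 연산 n
--
--     for i in range(n):#반복문 n + 1
--         sum += 1 #덧셈 연산 n
--
--     return sum      #리턴 1회
-- ===== SOURCE B (Python) =====
-- def func(n):
--     # closed form: each of A's two loops adds 1 exactly max(n,0) times
--     return 2 * n if n > 0 else 0
-- ===== Notes on version B (the rewrite author's own statement) =====
-- stated objective: faster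
-- what changed: Replaced the two counting loops by a closed-form expression.
import Mathlib
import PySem

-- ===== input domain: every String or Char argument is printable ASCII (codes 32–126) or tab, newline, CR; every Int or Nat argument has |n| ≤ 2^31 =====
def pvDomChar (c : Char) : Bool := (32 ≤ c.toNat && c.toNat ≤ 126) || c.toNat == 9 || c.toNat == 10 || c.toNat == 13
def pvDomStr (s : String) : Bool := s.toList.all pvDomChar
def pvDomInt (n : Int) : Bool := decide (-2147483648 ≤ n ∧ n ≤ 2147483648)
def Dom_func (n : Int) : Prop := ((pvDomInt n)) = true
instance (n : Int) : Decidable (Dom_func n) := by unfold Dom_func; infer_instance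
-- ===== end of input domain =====

-- ===== PORT A =====
-- two for-loops over range(n), each adding 1 to sum; B below is the closed form (faster)
def func (n : Int) : Int :=
  let sum : Int := 0
  let sum := (PySem.List.pyRange 0 n 1).foldl (fun s _ => s + 1) sum
  let sum := (PySem.List.pyRange 0 n 1).foldl (fun s _ => s + 1) sum
  sum

-- ===== PORT B =====
def func_alt (n : Int) : Int :=
  if n > 0 then 2 * n else 0

-- ===== PRECONDITION & SPEC =====
def Spec_func (n : Int) (out : Int) : Prop := out = func_alt n
instance (n : Int) (out : Int) : Decidable (Spec_func n out) := by unfold Spec_func; infer_instance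

-- ===== CLAIM (what is proved, stated in full; the proofs are below) =====
def Claim_equal_func : Prop := ∀ (n : Int), Dom_func n → Spec_func n (func n)

-- ===== LEMMAS AND PROOFS =====

-- ===== VERDICT (by name: the statement is the Claim_ definition above) =====
theorem foldl_add_one (xs : List Int) (s : Int) :
    xs.foldl (fun a _ => a + 1) s = s + xs.length := by
  induction xs generalizing s with
  | nil => simp
  | cons x xs ih => simp [List.foldl, ih]; ring

theorem func_spec : Claim_equal_func := by
  intro n _
  unfold Spec_func func func_alt
  simp only [foldl_add_one, PySem.List.length_pyRange_one]
  split_ifs with h <;> omega
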